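-- pv_equiv track=rewrite | github.com/sishsihsishsishis/sync-video-analysis-model | services/gpt.py | concatenate_nlp_data
-- ===== SOURCE A (Python) =====
-- def concatenate_nlp_data(nlp_data, n):
--     concatenated_data = []
--     sb = []
--     count = 0
--     for data_array in nlp_data:
--         sb.append("\t".join(data_array[:4]))
--         count += 1
--         if count % n == 0:
--             concatenated_data.append("\n".join(sb))
--             sb.clear()
--     if sb:
--         concatenated_data.append("\n".join(sb))
--     return concatenated_data
-- ===== SOURCE B (Python) =====
-- def concatenate_nlp_data(nlp_data, n):
--     rows = ["\t".join(d[:4]) for d in nlp_data]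
--     return ["\n".join(rows[i:i+n]) for i in range(0, len(rows), n)]
-- ===== Notes on version B (the rewrite author's own statement) =====
-- stated objective: idiomatic
-- what changed: Replaces A's single pass with a running count, modulo test and mutable buffer that is flushed and cleared, by a two-phase build-then-slice: first map every row to its tab-joined prefix, then emit chunks by index slicing that list with range(0, len, n). Pre_ excludes n <= 0: at n = 0 A raises ZeroDivisionError (and B raises ValueError), and a negative chunk size is an unspecified corner on which A chunks by |n| while B yields no chunks - both readings are defensible, so those inputs are outside the claim.
-- outside the precondition, e.g. on concatenate_nlp_data([['a'], ['b'], ['c']], -2): A returns ['a\nb', 'c'], B returns []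
import Mathlib
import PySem

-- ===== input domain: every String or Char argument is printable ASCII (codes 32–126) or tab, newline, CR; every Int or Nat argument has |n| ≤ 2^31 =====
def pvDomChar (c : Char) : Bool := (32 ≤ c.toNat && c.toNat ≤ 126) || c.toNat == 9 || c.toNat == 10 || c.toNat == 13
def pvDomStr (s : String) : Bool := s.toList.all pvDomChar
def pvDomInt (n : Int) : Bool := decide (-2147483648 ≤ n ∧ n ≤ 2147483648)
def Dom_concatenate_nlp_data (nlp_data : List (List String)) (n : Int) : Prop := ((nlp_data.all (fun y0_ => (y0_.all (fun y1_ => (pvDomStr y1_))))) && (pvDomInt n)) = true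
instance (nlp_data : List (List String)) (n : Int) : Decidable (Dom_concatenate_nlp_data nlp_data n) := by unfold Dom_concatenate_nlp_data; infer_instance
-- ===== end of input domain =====

-- B re-implements A's count/modulo/buffer loop as a two-phase build-then-slice (map rows, then
-- slice by index); equivalence is proved for chunk sizes n ≥ 1.

-- ===== PORT A =====
-- the body of A's for-loop: append the tab-joined 4-prefix, bump the count, flush on count % n == 0
def aStep (n : Int) (st : List String × List String × Int) (data_array : List String) :
    List String × List String × Int :=
  let sb := st.2.1 ++ [PySem.Str.join "\t" (PySem.List.slice data_array none (some 4))]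
  let count := st.2.2 + 1
  if PySem.Int.mod count n = 0 then (st.1 ++ [PySem.Str.join "\n" sb], [], count)
  else (st.1, sb, count)

def concatenate_nlp_data (nlp_data : List (List String)) (n : Int) : List String :=
  let st := nlp_data.foldl (aStep n) ([], [], 0)
  if st.2.1 ≠ [] then st.1 ++ [PySem.Str.join "\n" st.2.1] else st.1

-- ===== PORT B =====
def concatenate_nlp_data_alt (nlp_data : List (List String)) (n : Int) : List String :=
  let rows := nlp_data.map (fun d => PySem.Str.join "\t" (PySem.List.slice d none (some 4)))
  (PySem.List.pyRange 0 (rows.length : Int) n).map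
    (fun i => PySem.Str.join "\n" (PySem.List.slice rows (some i) (some (i + n))))

-- ===== PRECONDITION & SPEC =====
-- Pre_ excludes n ≤ 0: at n = 0 A raises ZeroDivisionError (and B raises ValueError), and a
-- negative chunk size is an unspecified corner on which A chunks by |n| while B yields no
-- chunks — both readings are defensible, so those inputs are outside the claim.
def Pre_concatenate_nlp_data (_nlp_data : List (List String)) (n : Int) : Prop := 1 ≤ n
instance (nlp_data : List (List String)) (n : Int) : Decidable (Pre_concatenate_nlp_data nlp_data n) := by unfold Pre_concatenate_nlp_data; infer_instance

def pvWitness_concatenate_nlp_data : List (List String) × Int :=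
  ([["a", "b", "c", "d", "e"], ["f"], [], ["g", "h"]], 2)

def Spec_concatenate_nlp_data (nlp_data : List (List String)) (n : Int) (out : List String) : Prop := out = concatenate_nlp_data_alt nlp_data n
instance (nlp_data : List (List String)) (n : Int) (out : List String) : Decidable (Spec_concatenate_nlp_data nlp_data n out) := by unfold Spec_concatenate_nlp_data; infer_instance

-- ===== CLAIM (what is proved, stated in full; the proofs are below) =====
def Claim_equal_concatenate_nlp_data : Prop := ∀ (nlp_data : List (List String)) (n : Int), Dom_concatenate_nlp_data nlp_data n → Pre_concatenate_nlp_data nlp_data n → Spec_concatenate_nlp_data nlp_data n (concatenate_nlp_data nlp_data n)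

-- ===== LEMMAS AND PROOFS =====

-- common shape both sides are reduced to: "\n"-join the rows in chunks of size m+1
def joinChunks (m : Nat) : List String → List String
  | [] => []
  | r :: rs => PySem.Str.join "\n" (r :: rs.take m) :: joinChunks m (rs.drop m)
termination_by rs => rs.length
decreasing_by simp

lemma joinChunks_nil (m : Nat) : joinChunks m [] = [] := by
  rw [joinChunks]

lemma joinChunks_cons (m : Nat) (r : String) (rs : List String) :
    joinChunks m (r :: rs)
      = PySem.Str.join "\n" (r :: rs.take m) :: joinChunks m (rs.drop m) := by
  rw [joinChunks]

lemma joinChunks_ne_nil (m : Nat) (xs : List String) (h : xs ≠ []) :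
    joinChunks m xs
      = PySem.Str.join "\n" (xs.take (m + 1)) :: joinChunks m (xs.drop (m + 1)) := by
  cases xs with
  | nil => exact absurd rfl h
  | cons r rs => rw [joinChunks_cons]; simp

lemma joinChunks_short (m : Nat) (xs : List String) (h1 : xs ≠ []) (h2 : xs.length ≤ m + 1) :
    joinChunks m xs = [PySem.Str.join "\n" xs] := by
  rw [joinChunks_ne_nil m xs h1, List.take_of_length_le h2, List.drop_eq_nil_of_le h2,
    joinChunks_nil]

lemma joinChunks_full (m : Nat) (sb rs : List String) (h : sb.length = m + 1) :
    joinChunks m (sb ++ rs) = PySem.Str.join "\n" sb :: joinChunks m rs := by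
  have hne : sb ++ rs ≠ [] := by
    cases sb with
    | nil => simp at h
    | cons a b => simp
  rw [joinChunks_ne_nil m _ hne, List.take_left' h, List.drop_left' h]

-- count % n steps to (sb.length + 1) % n
lemma mod_succ_eq (n count L : Int) (hn : 0 < n) (h : PySem.Int.mod count n = L) :
    PySem.Int.mod (count + 1) n = (L + 1) % n := by
  rw [PySem.Int.mod_eq_emod_of_pos hn] at h ⊢
  have hdm : n * (count / n) + count % n = count := Int.mul_ediv_add_emod count n
  have hstep : count + 1 = (L + 1) + n * (count / n) := by omega
  rw [hstep, Int.add_mul_emod_self_left]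

-- the A-side loop, with generalized accumulator, computes cd ++ chunks of (sb ++ rows)
lemma aLoop_spec (m : Nat) (n : Int) (hn : n = (m : Int) + 1) :
    ∀ (rows : List String) (cd sb : List String) (count : Int),
      PySem.Int.mod count n = (sb.length : Int) → sb.length ≤ m →
      (let st := rows.foldl
          (fun (st : List String × List String × Int) r =>
            if PySem.Int.mod (st.2.2 + 1) n = 0 then
              (st.1 ++ [PySem.Str.join "\n" (st.2.1 ++ [r])], [], st.2.2 + 1)
            else (st.1, st.2.1 ++ [r], st.2.2 + 1)) (cd, sb, count)
       if st.2.1 ≠ [] then st.1 ++ [PySem.Str.join "\n" st.2.1] else st.1)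
        = cd ++ joinChunks m (sb ++ rows) := by
  intro rows
  induction rows with
  | nil =>
    intro cd sb count hmod hle
    by_cases hsb : sb = []
    · subst hsb; simp [joinChunks_nil]
    · simp only [List.foldl_nil, List.append_nil]
      rw [joinChunks_short m sb hsb (Nat.le_succ_of_le hle)]
      simp [hsb]
  | cons r rs ih =>
    intro cd sb count hmod hle
    have hn0 : (0 : Int) < n := by omega
    have hkey := mod_succ_eq n count (sb.length : Int) hn0 hmod
    simp only [List.foldl_cons]
    by_cases hfull : sb.length = m
    · have hz : PySem.Int.mod (count + 1) n = 0 := by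
        rw [hkey, hfull, hn]; exact Int.emod_self
      rw [if_pos hz]
      have h1 : PySem.Int.mod (count + 1) n = ((List.nil (α := String)).length : Int) := by
        rw [hz]; simp
      have hrec := ih (cd ++ [PySem.Str.join "\n" (sb ++ [r])]) [] (count + 1) h1
        (Nat.zero_le m)
      rw [hrec]
      have hlen : (sb ++ [r]).length = m + 1 := by simp [hfull]
      have hsplit : sb ++ r :: rs = (sb ++ [r]) ++ rs := by simp
      rw [hsplit, joinChunks_full m (sb ++ [r]) rs hlen]
      simp
    · have hlt : sb.length < m := lt_of_le_of_ne hle hfull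
      have hnz : PySem.Int.mod (count + 1) n ≠ 0 := by
        rw [hkey, Int.emod_eq_of_lt (by omega) (by omega)]
        omega
      rw [if_neg hnz]
      have h1 : PySem.Int.mod (count + 1) n = (((sb ++ [r]).length : Nat) : Int) := by
        rw [hkey, Int.emod_eq_of_lt (by omega) (by omega)]
        simp
      have hrec := ih cd (sb ++ [r]) (count + 1) h1 (by simp; omega)
      rw [hrec]
      simp

-- an empty positive-step range
lemma pyRange_nonpos (L s : Int) (hs : 0 < s) (hL : L ≤ 0) :
    PySem.List.pyRange 0 L s = [] := by
  rw [PySem.List.pyRange_of_pos _ _ hs, if_neg (by omega)]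
  simp

-- splitting off the first step of a positive-step range from 0
lemma pyRange_pos_cons (L s : Int) (hs : 0 < s) (hL : 0 < L) :
    PySem.List.pyRange 0 L s = 0 :: (PySem.List.pyRange 0 (L - s) s).map (· + s) := by
  rw [PySem.List.pyRange_of_pos _ _ hs, PySem.List.pyRange_of_pos _ _ hs]
  have hcount : (if (0:Int) < L then ((L - 0 + s - 1) / s).toNat else 0)
      = (if (0:Int) < L - s then ((L - s - 0 + s - 1) / s).toNat else 0) + 1 := by
    rw [if_pos hL]
    by_cases hLs : (0:Int) < L - s
    · rw [if_pos hLs]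
      have hsplit : L - 0 + s - 1 = (L - s - 0 + s - 1) + 1 * s := by ring
      rw [hsplit, Int.add_mul_ediv_right _ _ (by omega : s ≠ 0)]
      have : 0 ≤ (L - s - 0 + s - 1) / s := Int.ediv_nonneg (by omega) (by omega)
      omega
    · rw [if_neg hLs]
      have h1 : L - 0 + s - 1 = (L - 1) + 1 * s := by ring
      have h2 : (L - 1) / s = 0 := Int.ediv_eq_zero_of_lt (by omega) (by omega)
      rw [h1, Int.add_mul_ediv_right _ _ (by omega : s ≠ 0), h2]
      simp
  rw [hcount, List.range_succ_eq_map]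
  simp only [List.map_cons, List.map_map]
  congr 1
  · simp
  · apply List.map_congr_left
    intro k _
    simp only [Function.comp_apply]
    push_cast
    ring

-- the B-side comprehension over range(0, len(rows), n) is the same chunking
lemma bMap_spec (m : Nat) (n : Int) (hn : n = (m : Int) + 1) :
    ∀ (rows : List String),
      (PySem.List.pyRange 0 (rows.length : Int) n).map
        (fun i => PySem.Str.join "\n" (PySem.List.slice rows (some i) (some (i + n))))
        = joinChunks m rows
  | [] => by
    rw [joinChunks_nil]
    rw [show ((List.nil (α := String)).length : Int) = 0 by simp]
    rw [pyRange_nonpos 0 n (by omega) (by omega)]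
    simp
  | r :: rs => by
    have hn0 : (0 : Int) < n := by omega
    have hL : (0 : Int) < (((r :: rs).length : Nat) : Int) := by
      push_cast [List.length_cons]; omega
    rw [pyRange_pos_cons _ n hn0 hL]
    rw [joinChunks_cons]
    simp only [List.map_cons, List.map_map]
    congr 1
    · -- head chunk
      congr 1
      rw [zero_add, PySem.List.slice_toNat _ (by omega) (by omega)]
      have h1 : n.toNat - (0 : Int).toNat = m + 1 := by omega
      rw [h1]
      simp
    · -- remaining chunks
      have hR : PySem.List.pyRange 0 ((((r :: rs).length : Nat) : Int) - n) n
          = PySem.List.pyRange 0 (((rs.drop m).length : Nat) : Int) n := by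
        by_cases hcase : m ≤ rs.length
        · congr 1
          push_cast [List.length_drop, List.length_cons]
          omega
        · rw [pyRange_nonpos _ n hn0 (by push_cast [List.length_cons]; omega),
            pyRange_nonpos _ n hn0 (by push_cast [List.length_drop]; omega)]
      rw [hR, ← bMap_spec m n hn (rs.drop m)]
      apply List.map_congr_left
      intro i hi
      obtain ⟨hi0, hiL, -⟩ := (PySem.List.mem_pyRange_iff_of_pos hn0 i).mp hi
      simp only [Function.comp_apply]
      congr 1
      rw [PySem.List.slice_toNat _ (by omega) (by omega),
        PySem.List.slice_toNat _ (by omega) (by omega)]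
      have h2 : (i + n + n).toNat - (i + n).toNat = m + 1 := by omega
      have h3 : (i + n).toNat - i.toNat = m + 1 := by omega
      have h1 : (i + n).toNat = (i.toNat + m) + 1 := by omega
      rw [h2, h3, h1, List.drop_drop, List.drop_succ_cons]
      rw [show i.toNat + m = m + i.toNat by omega]
termination_by rows => rows.length
decreasing_by simp

theorem concatenate_nlp_data_spec : Claim_equal_concatenate_nlp_data := by
  intro nlp_data n _ hpre
  unfold Pre_concatenate_nlp_data at hpre
  unfold Spec_concatenate_nlp_data concatenate_nlp_data concatenate_nlp_data_alt
  obtain ⟨m, hm⟩ : ∃ m : Nat, n = (m : Int) + 1 := ⟨(n - 1).toNat, by omega⟩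
  have hA := aLoop_spec m n hm
    (nlp_data.map (fun d => PySem.Str.join "\t" (PySem.List.slice d none (some 4)))) [] [] 0
    (by rw [PySem.Int.mod_eq_emod_of_pos (by omega)]; simp) (by simp)
  have hB := bMap_spec m n hm
    (nlp_data.map (fun d => PySem.Str.join "\t" (PySem.List.slice d none (some 4))))
  simp only [List.foldl_map, List.nil_append] at hA
  rw [hB]
  simpa [aStep] using hA
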